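-- pv_equiv track=rewrite | github.com/6210qwe/leetcode_py | leetcode_solutions/by_id/q1000561.py | solution_function_name
-- ===== SOURCE A (Python) =====
-- from typing import List, Optional
--
-- def solution_function_name(expeditions: List[str]) -> int:
--     """
--     函数式接口 - 找出小扣发现新营地最多且索引最小的那次探险，并返回对应的记录索引。
--     """
--     known_camps = set()
--
--     # 提取初始已知的营地
--     if expeditions[0]:
--         known_camps.update(expeditions[0].split("->"))
--
--     max_new_camps = 0
--     max_index = -1
--
--     for i in range(1, len(expeditions)):
--         if not expeditions[i]:
--             continue
--
--         current_camps = expeditions[i].split("->")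
--         new_camps_count = sum(1 for camp in current_camps if camp not in known_camps)
--
--         if new_camps_count > max_new_camps:
--             max_new_camps = new_camps_count
--             max_index = i
--
--         known_camps.update(current_camps)
--
--     return max_index
-- ===== SOURCE B (Python) =====
-- def solution_function_name(expeditions):
--     """Two-pass: build a first-occurrence table, then score each expedition by
--     how many of its camps first occur there (strict '>' keeps the smallest tying index)."""
--     first_occurrence = {}
--     for i, rec in enumerate(expeditions):
--         if rec:
--             for camp in rec.split("->"):
--                 if camp not in first_occurrence:
--                     first_occurrence[camp] = i
--     max_new = 0
--     max_index = -1
--     for i in range(1, len(expeditions)):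
--         rec = expeditions[i]
--         if not rec:
--             continue
--         new_count = sum(1 for camp in rec.split("->") if first_occurrence[camp] == i)
--         if new_count > max_new:
--             max_new = new_count
--             max_index = i
--     return max_index
-- ===== Notes on version B (the rewrite author's own statement) =====
-- stated objective: alternative
-- what changed: Replaces A's single pass with a running known-camps set by two passes: first build a first-occurrence dict mapping each camp to the earliest expedition index mentioning it, then score each expedition i by counting camps whose first occurrence is i.
import Mathlib
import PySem

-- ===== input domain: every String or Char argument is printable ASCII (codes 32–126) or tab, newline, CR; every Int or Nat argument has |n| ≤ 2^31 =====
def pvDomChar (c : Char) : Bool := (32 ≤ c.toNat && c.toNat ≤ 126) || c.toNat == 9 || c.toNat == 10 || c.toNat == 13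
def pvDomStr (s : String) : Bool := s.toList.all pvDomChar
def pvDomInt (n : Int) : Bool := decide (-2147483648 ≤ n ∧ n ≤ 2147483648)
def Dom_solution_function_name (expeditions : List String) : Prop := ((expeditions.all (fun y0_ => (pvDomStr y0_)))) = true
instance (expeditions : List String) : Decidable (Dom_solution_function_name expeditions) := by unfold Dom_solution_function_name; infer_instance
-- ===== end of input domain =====

-- B replaces A's running known-camps set with a precomputed first-occurrence table and a
-- second scoring pass (alternative decomposition, same cost). Equivalence is about the
-- return value; neither program mutates its argument.

-- s.split("->") — the separator is nonempty, so Python's split always returns a list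
def pvCampsOf (s : String) : List String := (PySem.Str.split? s "->").getD []

-- ===== PORT A =====
def pvALoop : List String → Int → PySem.Set String → Int → Int → Int
  | [], _, _, _, maxIdx => maxIdx
  | e :: rs, i, known, maxNew, maxIdx =>
    if e = "" then pvALoop rs (i + 1) known maxNew maxIdx
    else
      let cs := pvCampsOf e
      let cnt : Int := (cs.filter (fun c => !(PySem.Set.contains known c))).length
      let known' := PySem.Set.update known cs
      if cnt > maxNew then pvALoop rs (i + 1) known' cnt i
      else pvALoop rs (i + 1) known' maxNew maxIdx

def solution_function_name (expeditions : List String) : Int :=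
  match expeditions with
  | [] => -1   -- Python raises IndexError on expeditions[0] here; excluded by Pre_
  | e0 :: rest =>
    let known := if e0 ≠ "" then PySem.Set.update PySem.Set.empty (pvCampsOf e0) else PySem.Set.empty
    pvALoop rest 1 known 0 (-1)

-- ===== PORT B =====
def pvFirstOcc : List String → Int → PySem.Dict String Int → PySem.Dict String Int
  | [], _, fo => fo
  | r :: rs, i, fo =>
    if r = "" then pvFirstOcc rs (i + 1) fo
    else pvFirstOcc rs (i + 1)
      ((pvCampsOf r).foldl (fun d c => if d.contains c then d else d.insert c i) fo)

def pvBLoop : List String → Int → PySem.Dict String Int → Int → Int → Int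
  | [], _, _, _, maxIdx => maxIdx
  | r :: rs, i, fo, maxNew, maxIdx =>
    if r = "" then pvBLoop rs (i + 1) fo maxNew maxIdx
    else
      let cnt : Int := ((pvCampsOf r).filter (fun c => fo.get? c == some i)).length
      if cnt > maxNew then pvBLoop rs (i + 1) fo cnt i
      else pvBLoop rs (i + 1) fo maxNew maxIdx

def solution_function_name_alt (expeditions : List String) : Int :=
  let fo := pvFirstOcc expeditions 0 PySem.Dict.empty
  pvBLoop (expeditions.drop 1) 1 fo 0 (-1)

-- ===== PRECONDITION & SPEC =====
-- Pre_ excludes only the empty list, on which A raises IndexError at expeditions[0] (B would return -1 there).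
def Pre_solution_function_name (expeditions : List String) : Prop := expeditions ≠ []
instance (expeditions : List String) : Decidable (Pre_solution_function_name expeditions) := by
  unfold Pre_solution_function_name; infer_instance
def pvWitness_solution_function_name : List String := ["a->b", "b->c->c"]

def Spec_solution_function_name (expeditions : List String) (out : Int) : Prop :=
  out = solution_function_name_alt expeditions
instance (expeditions : List String) (out : Int) : Decidable (Spec_solution_function_name expeditions out) := by
  unfold Spec_solution_function_name; infer_instance

-- ===== CLAIM (what is proved, stated in full; the proofs are below) =====
def Claim_equal_solution_function_name : Prop := ∀ (expeditions : List String), Dom_solution_function_name expeditions → Pre_solution_function_name expeditions → Spec_solution_function_name expeditions (solution_function_name expeditions)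

-- ===== LEMMAS AND PROOFS =====

-- camp c is discovered by record r (nonempty record mentioning c)
def pvHits (c : String) (r : String) : Bool := !(r == "") && (pvCampsOf r).contains c

theorem pvHits_iff (c r : String) (hr : r ≠ "") : pvHits c r = true ↔ c ∈ pvCampsOf r := by
  simp [pvHits, hr]

theorem pvHits_empty (c : String) : pvHits c "" = false := by simp [pvHits]

-- the inner first-occurrence fold
theorem pvFoldIns_get? (cs : List String) (i : Int) (d : PySem.Dict String Int) (c : String) :
    (cs.foldl (fun d c => if d.contains c then d else d.insert c i) d).get? c =
      match d.get? c with
      | some v => some v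
      | none => if cs.contains c then some i else none := by
  induction cs generalizing d with
  | nil => cases h : d.get? c <;> simp [h]
  | cons c' cs' ih =>
    simp only [List.foldl_cons]
    by_cases hc : d.contains c' = true
    · rw [if_pos hc, ih]
      cases h : d.get? c with
      | some v => simp
      | none =>
        have hne : c ≠ c' := by
          intro he; subst he
          rw [PySem.Dict.contains_eq_isSome_get?, h] at hc; simp at hc
        simp [hne]
    · rw [if_neg hc, ih]
      by_cases he : c = c'
      · subst he
        have h : d.get? c = none := by
          rw [PySem.Dict.contains_eq_isSome_get?] at hc
          cases h : d.get? c <;> simp [h] at hc ⊢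
        rw [PySem.Dict.get?_insert_self]
        simp [h]
      · rw [PySem.Dict.get?_insert_of_ne _ _ he]
        cases h : d.get? c <;> simp [he]

theorem pvFirstOcc_get? (l : List String) (i : Int) (d : PySem.Dict String Int) (c : String) :
    (pvFirstOcc l i d).get? c =
      match d.get? c with
      | some v => some v
      | none => (List.findIdx? (pvHits c) l).map (fun p => i + (p : Int)) := by
  induction l generalizing i d with
  | nil => cases h : d.get? c <;> simp [pvFirstOcc, h]
  | cons r rs ih =>
    by_cases hr : r = ""
    · subst hr
      rw [show pvFirstOcc ("" :: rs) i d = pvFirstOcc rs (i + 1) d from rfl, ih]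
      cases h : d.get? c with
      | some v => simp
      | none =>
        rw [List.findIdx?_cons]
        cases hf : List.findIdx? (pvHits c) rs <;> simp [pvHits_empty]; omega
    · rw [show pvFirstOcc (r :: rs) i d =
          pvFirstOcc rs (i + 1) ((pvCampsOf r).foldl (fun d c => if d.contains c then d else d.insert c i) d)
          from by simp [pvFirstOcc, hr], ih, pvFoldIns_get?]
      cases h : d.get? c with
      | some v => simp
      | none =>
        rw [List.findIdx?_cons]
        by_cases hm : c ∈ pvCampsOf r
        · have hh : pvHits c r = true := (pvHits_iff c r hr).mpr hm
          simp [hm, hh]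
        · have hh : pvHits c r = false := by simp [pvHits]; exact fun _ => hm
          simp only [hh]
          cases hf : List.findIdx? (pvHits c) rs <;> simp [hm]; omega

-- the relation between A's running set and B's first-occurrence table at step i
def pvInv (rest : List String) (i : Int) (known : PySem.Set String) (fo : PySem.Dict String Int) : Prop :=
  (∀ c, PySem.Set.contains known c = true ↔ ∃ j : Int, fo.get? c = some j ∧ j < i) ∧
  (∀ p (hp : p < rest.length) c, pvHits c rest[p] = true → ∃ j : Int, fo.get? c = some j ∧ j ≤ i + p) ∧
  (∀ c (j : Int), fo.get? c = some j → i ≤ j →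
      ∃ p, ∃ hp : p < rest.length, (i + (p : Int) = j) ∧ pvHits c rest[p] = true)

theorem pvLoop_eq : ∀ (rest : List String) (i : Int) (known : PySem.Set String)
    (fo : PySem.Dict String Int) (maxNew maxIdx : Int), pvInv rest i known fo →
    pvALoop rest i known maxNew maxIdx = pvBLoop rest i fo maxNew maxIdx := by
  intro rest
  induction rest with
  | nil => intro i known fo maxNew maxIdx _; rfl
  | cons e rs ih =>
    intro i known fo maxNew maxIdx hInv
    obtain ⟨H1, H2, H3⟩ := hInv
    by_cases he : e = ""
    · subst he
      rw [show pvALoop ("" :: rs) i known maxNew maxIdx = pvALoop rs (i + 1) known maxNew maxIdx from rfl,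
          show pvBLoop ("" :: rs) i fo maxNew maxIdx = pvBLoop rs (i + 1) fo maxNew maxIdx from rfl]
      apply ih
      refine ⟨fun c => ?_, fun p hp c hhit => ?_, fun c j hj hij => ?_⟩
      · rw [H1 c]
        constructor
        · rintro ⟨j, hj, hlt⟩; exact ⟨j, hj, by omega⟩
        · rintro ⟨j, hj, hlt⟩
          refine ⟨j, hj, ?_⟩
          by_contra hge
          have hji : j = i := by omega
          obtain ⟨p, hp, hpe, hhit⟩ := H3 c j hj (by omega)
          have hp0 : p = 0 := by omega
          subst hp0
          simp [pvHits_empty] at hhit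
      · obtain ⟨j, hj, hle⟩ := H2 (p + 1) (by simpa using hp) c (by simpa using hhit)
        exact ⟨j, hj, by push_cast at hle ⊢; omega⟩
      · obtain ⟨p, hp, hpe, hhit⟩ := H3 c j hj (by omega)
        match p, hp with
        | 0, _ => exfalso; simp [pvHits_empty] at hhit
        | p' + 1, hp =>
          exact ⟨p', by simpa using hp, by push_cast at hpe ⊢; omega, by simpa using hhit⟩
    · have hcnt : ((pvCampsOf e).filter (fun c => !(PySem.Set.contains known c))).length
          = ((pvCampsOf e).filter (fun c => fo.get? c == some i)).length := by
        congr 1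
        apply List.filter_congr
        intro c hc
        obtain ⟨j, hj, hle⟩ := H2 0 (by simp) c (by simpa using (pvHits_iff c e he).mpr hc)
        rw [hj]
        by_cases hlt : j < i
        · have hk : PySem.Set.contains known c = true := (H1 c).mpr ⟨j, hj, hlt⟩
          rw [hk]
          simp [show j ≠ i by omega]
        · have hji : j = i := by omega
          have hk : PySem.Set.contains known c = false := Bool.eq_false_iff.mpr (by
            intro h
            obtain ⟨j', hj', hlt'⟩ := (H1 c).mp h
            rw [hj] at hj'; injection hj' with h'; omega)
          rw [hk]
          simp [hji]
      have hInv' : pvInv rs (i + 1) (PySem.Set.update known (pvCampsOf e)) fo := by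
        refine ⟨fun c => ?_, fun p hp c hhit => ?_, fun c j hj hij => ?_⟩
        · rw [PySem.Set.contains_iff, PySem.Set.mem_update]
          constructor
          · rintro (hmem | hmem)
            · obtain ⟨j, hj, hlt⟩ := (H1 c).mp (by rwa [PySem.Set.contains_iff])
              exact ⟨j, hj, by omega⟩
            · obtain ⟨j, hj, hle⟩ := H2 0 (by simp) c (by simpa using (pvHits_iff c e he).mpr hmem)
              exact ⟨j, hj, by omega⟩
          · rintro ⟨j, hj, hlt⟩
            by_cases hlt' : j < i
            · exact Or.inl (by rw [← PySem.Set.contains_iff]; exact (H1 c).mpr ⟨j, hj, hlt'⟩)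
            · have hji : j = i := by omega
              obtain ⟨p, hp, hpe, hhit⟩ := H3 c j hj (by omega)
              have hp0 : p = 0 := by omega
              subst hp0
              exact Or.inr ((pvHits_iff c e he).mp (by simpa using hhit))
        · obtain ⟨j, hj, hle⟩ := H2 (p + 1) (by simpa using hp) c (by simpa using hhit)
          exact ⟨j, hj, by push_cast at hle ⊢; omega⟩
        · obtain ⟨p, hp, hpe, hhit⟩ := H3 c j hj (by omega)
          match p, hp with
          | 0, _ => exfalso; simp at hpe; omega
          | p' + 1, hp =>
            exact ⟨p', by simpa using hp, by push_cast at hpe ⊢; omega, by simpa using hhit⟩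
      rw [show pvALoop (e :: rs) i known maxNew maxIdx =
            (if ((pvCampsOf e).filter (fun c => !(PySem.Set.contains known c))).length > maxNew
             then pvALoop rs (i + 1) (PySem.Set.update known (pvCampsOf e)) (((pvCampsOf e).filter (fun c => !(PySem.Set.contains known c))).length : Int) i
             else pvALoop rs (i + 1) (PySem.Set.update known (pvCampsOf e)) maxNew maxIdx)
          from by simp [pvALoop, he],
          show pvBLoop (e :: rs) i fo maxNew maxIdx =
            (if ((pvCampsOf e).filter (fun c => fo.get? c == some i)).length > maxNew
             then pvBLoop rs (i + 1) fo (((pvCampsOf e).filter (fun c => fo.get? c == some i)).length : Int) i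
             else pvBLoop rs (i + 1) fo maxNew maxIdx)
          from by simp [pvBLoop, he],
          hcnt]
      split_ifs with h
      · exact ih (i + 1) _ fo _ i hInv'
      · exact ih (i + 1) _ fo _ maxIdx hInv'

theorem pvInv_init (e0 : String) (rest : List String) :
    pvInv rest 1
      (if e0 ≠ "" then PySem.Set.update PySem.Set.empty (pvCampsOf e0) else PySem.Set.empty)
      (pvFirstOcc (e0 :: rest) 0 PySem.Dict.empty) := by
  have hget : ∀ c, (pvFirstOcc (e0 :: rest) 0 PySem.Dict.empty).get? c
      = (List.findIdx? (pvHits c) (e0 :: rest)).map (fun p => ((p : Int))) := by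
    intro c
    rw [pvFirstOcc_get?]
    simp [PySem.Dict.get?_empty]
  refine ⟨fun c => ?_, fun p hp c hhit => ?_, fun c j hj hij => ?_⟩
  · rw [hget]
    have hmem : (if e0 ≠ "" then PySem.Set.update PySem.Set.empty (pvCampsOf e0) else PySem.Set.empty).contains c = true
        ↔ pvHits c e0 = true := by
      by_cases he : e0 = ""
      · subst he; simp [pvHits_empty, PySem.Set.empty]
      · rw [if_pos he]
        rw [PySem.Set.contains_iff, PySem.Set.mem_update, pvHits_iff c e0 he]
        simp [PySem.Set.empty]
    rw [hmem]
    constructor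
    · intro hh
      refine ⟨0, ?_, by omega⟩
      simp [List.findIdx?_cons, hh]
    · rintro ⟨j, hj, hlt⟩
      cases hf : List.findIdx? (pvHits c) (e0 :: rest) with
      | none => rw [hf] at hj; simp at hj
      | some q =>
        rw [hf] at hj; simp at hj
        have hq : q = 0 := by omega
        subst hq
        rw [List.findIdx?_eq_some_iff_getElem] at hf
        obtain ⟨_, hP, _⟩ := hf
        simpa using hP
  · have hp1 : p + 1 < (e0 :: rest).length := by simpa using hp
    have hP : pvHits c ((e0 :: rest)[p + 1]'hp1) = true := by simpa using hhit
    cases hf : List.findIdx? (pvHits c) (e0 :: rest) with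
    | none =>
      rw [List.findIdx?_eq_none_iff] at hf
      simp [hf (rest[p]'hp) (List.mem_cons_of_mem _ (List.getElem_mem hp))] at hhit
    | some q =>
      have hf' := hf
      rw [List.findIdx?_eq_some_iff_getElem] at hf'
      obtain ⟨hq, _, hmin⟩ := hf'
      have hqle : q ≤ p + 1 := by
        by_contra hgt
        exact (hmin (p + 1) (by omega)) hP
      exact ⟨(q : Int), by rw [hget c, hf]; simp, by omega⟩
  · rw [hget c] at hj
    cases hf : List.findIdx? (pvHits c) (e0 :: rest) with
    | none => rw [hf] at hj; simp at hj
    | some q =>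
      rw [hf] at hj; simp at hj
      have hf' := hf
      rw [List.findIdx?_eq_some_iff_getElem] at hf'
      obtain ⟨hq, hP, _⟩ := hf'
      have hq1 : 1 ≤ q := by omega
      have hqlen : q - 1 < rest.length := by simp at hq; omega
      refine ⟨q - 1, hqlen, by omega, ?_⟩
      have hidx : (e0 :: rest)[q] = rest[q - 1]'hqlen := by
        rcases q with _ | q'
        · omega
        · simp
      rwa [hidx] at hP

-- ===== VERDICT (by name: the statement is the Claim_ definition above) =====
theorem solution_function_name_spec : Claim_equal_solution_function_name := by
  intro expeditions _ hpre
  unfold Spec_solution_function_name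
  match expeditions, hpre with
  | e0 :: rest, _ =>
    show pvALoop rest 1 _ 0 (-1) = solution_function_name_alt (e0 :: rest)
    unfold solution_function_name_alt
    simp only [List.drop_succ_cons, List.drop_zero]
    exact pvLoop_eq rest 1 _ _ 0 (-1) (pvInv_init e0 rest)
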